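-- pv_equiv track=rewrite | github.com/dotnfc/EPD_mpy_efont | examples/panel/epd_cz11.py | conv_data
-- ===== SOURCE A (Python) =====
-- def conv_data(dat):
--     '''Convert 8 bits to a short'''
--     result = 0
--     for bit_position in range(7, -1, -1):
--         bit_value = (dat >> bit_position) & 1  # 获取当前位的值（0或1）
--         if bit_value:
--             result = result << 2
--         else:
--             result = result << 2 | 3
--     return result
-- ===== SOURCE B (Python) =====
-- def conv_data(dat):
--     '''Convert 8 bits to a short'''
--     x = (~dat) & 0xFF          # output pair is 11 exactly where the input bit is 0
--     x = (x | (x << 4)) & 0x0F0F  # spread the 8 bits into even positions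
--     x = (x | (x << 2)) & 0x3333
--     x = (x | (x << 1)) & 0x5555
--     return x * 3               # duplicate each spread bit into its odd neighbour
-- ===== Notes on version B (the rewrite author's own statement) =====
-- stated objective: alternative
-- what changed: Replaced the per-bit loop with a closed-form bit-spread: complement the low byte, interleave its bits into even positions with three shift/mask steps, and triple the result to duplicate each bit into the '11' pair.
import Mathlib
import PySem

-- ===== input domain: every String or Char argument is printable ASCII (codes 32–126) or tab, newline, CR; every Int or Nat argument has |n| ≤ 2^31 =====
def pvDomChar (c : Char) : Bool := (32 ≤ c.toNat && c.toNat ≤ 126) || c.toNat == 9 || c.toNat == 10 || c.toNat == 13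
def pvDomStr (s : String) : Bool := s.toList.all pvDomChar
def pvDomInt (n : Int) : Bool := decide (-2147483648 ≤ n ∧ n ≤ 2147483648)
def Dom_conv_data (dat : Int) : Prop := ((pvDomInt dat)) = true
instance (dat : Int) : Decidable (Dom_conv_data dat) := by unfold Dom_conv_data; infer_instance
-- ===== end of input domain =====

-- B replaces the 8-step bit loop by a closed-form bit-spread (complement, interleave, ×3); alternative formulation, same cost.


-- ===== PORT A =====
-- literal port of A's loop; Python '(dat >> p) & 1' is exactly 'floordiv dat 2^p mod 2'
-- (arithmetic shift = floor division by 2^p; '& 1' = mod 2), and 'result << 2' / '| 3'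
-- on a value whose two low bits are clear are exactly '* 4' / '+ 3'.
def conv_data (dat : Int) : Int :=
  (PySem.List.pyRange 7 (-1) (-1)).foldl (fun result bit_position =>
    let bit_value := PySem.Int.mod (PySem.Int.floordiv dat (2 ^ bit_position.toNat)) 2
    if bit_value ≠ 0 then result * 4        -- result << 2
    else result * 4 + 3) 0                  -- result << 2 | 3

-- ===== PORT B =====
-- literal port of Source B; '(~dat) & 0xFF' is exactly '(-dat - 1) % 256' (Python '~' is -x-1,
-- masking a full low byte of an int is mod 2^8); the spread runs on that byte, a Nat.
def conv_data_alt (dat : Int) : Int :=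
  let x0 : Nat := (PySem.Int.mod (-dat - 1) 256).toNat   -- (~dat) & 0xFF, a value in [0, 256)
  let x1 : Nat := (x0 ||| (x0 <<< 4)) &&& 0x0F0F
  let x2 : Nat := (x1 ||| (x1 <<< 2)) &&& 0x3333
  let x3 : Nat := (x2 ||| (x2 <<< 1)) &&& 0x5555
  ((x3 * 3 : Nat) : Int)

-- ===== PRECONDITION & SPEC =====
def Spec_conv_data (dat : Int) (out : Int) : Prop := out = conv_data_alt dat
instance (dat : Int) (out : Int) : Decidable (Spec_conv_data dat out) := by unfold Spec_conv_data; infer_instance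

-- ===== CLAIM (what is proved, stated in full; the proofs are below) =====
def Claim_equal_conv_data : Prop := ∀ (dat : Int), Dom_conv_data dat → Spec_conv_data dat (conv_data dat)

-- ===== LEMMAS AND PROOFS =====

-- the countdown range is the literal list of bit positions
theorem pv_range_eval : PySem.List.pyRange 7 (-1) (-1) = [7,6,5,4,3,2,1,0] := by decide

-- A depends on dat only through dat % 256
theorem conv_data_period (dat : Int) : conv_data dat = conv_data (dat % 256) := by
  have h7 : dat / 128 % 2 = dat % 256 / 128 % 2 := by omega
  have h6 : dat / 64 % 2 = dat % 256 / 64 % 2 := by omega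
  have h5 : dat / 32 % 2 = dat % 256 / 32 % 2 := by omega
  have h4 : dat / 16 % 2 = dat % 256 / 16 % 2 := by omega
  have h3 : dat / 8 % 2 = dat % 256 / 8 % 2 := by omega
  have h2 : dat / 4 % 2 = dat % 256 / 4 % 2 := by omega
  have h1 : dat / 2 % 2 = dat % 256 / 2 % 2 := by omega
  have h0 : dat % 2 = dat % 256 % 2 := by omega
  simp only [conv_data, pv_range_eval, List.foldl]
  norm_num [PySem.Int.floordiv_eq_ediv_of_pos, PySem.Int.mod_eq_emod_of_pos, show (2:Int).toNat=2 from rfl, show (3:Int).toNat=3 from rfl, show (4:Int).toNat=4 from rfl, show (5:Int).toNat=5 from rfl, show (6:Int).toNat=6 from rfl, show (7:Int).toNat=7 from rfl]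
  rw [h7, h6, h5, h4, h3, h2, h1, h0]

-- B depends on dat only through dat % 256
theorem conv_data_alt_period (dat : Int) : conv_data_alt dat = conv_data_alt (dat % 256) := by
  have h : PySem.Int.mod (-dat - 1) 256 = PySem.Int.mod (-(dat % 256) - 1) 256 := by
    rw [PySem.Int.mod_eq_emod_of_pos (by norm_num), PySem.Int.mod_eq_emod_of_pos (by norm_num)]
    omega
  simp only [conv_data_alt, h]

-- the two ports agree on every residue 0 ≤ r < 256
set_option maxRecDepth 4000 in
theorem pv_agree_on_byte : ∀ r : Fin 256, conv_data (r.val : Int) = conv_data_alt (r.val : Int) := by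
  decide

-- ===== VERDICT (by name: the statement is the Claim_ definition above) =====
theorem conv_data_spec : Claim_equal_conv_data := by
  intro dat _
  unfold Spec_conv_data
  rw [conv_data_period, conv_data_alt_period]
  have h0 : 0 ≤ dat % 256 := Int.emod_nonneg _ (by norm_num)
  have h1 : dat % 256 < 256 := Int.emod_lt_of_pos _ (by norm_num)
  have hc : ((dat % 256).toNat : Int) = dat % 256 := Int.toNat_of_nonneg h0
  rw [← hc]
  exact pv_agree_on_byte ⟨(dat % 256).toNat, by omega⟩
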